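-- pv_equiv track=rewrite | github.com/DimusLite/kb_nov | main.py | swap_shifts
-- ===== SOURCE A (Python) =====
-- def swap_shifts(data, date1, date2):
--     watcher1, watcher2 = 'error', 'error'
--     for day in data:
--         if day['date'] == date1:
--             watcher1 = day['watcher']
--         if day['date'] == date2:
--             watcher2 = day['watcher']
--     if watcher1 != 'error' and watcher2 != 'error':
--         for day in data:
--             if day['date'] == date1:
--                 day['watcher'] = watcher2
--             if day['date'] == date2:
--                 day['watcher'] = watcher1
--     return data
-- ===== SOURCE B (Python) =====
-- def swap_shifts(data, date1, date2):
--     # Build a date -> positions index in one pass, then write only at the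
--     # indexed positions (no second scan of the whole list).
--     index = {}
--     for i, day in enumerate(data):
--         index.setdefault(day['date'], []).append(i)
--     g1 = index.get(date1, [])
--     g2 = index.get(date2, [])
--     w1 = data[g1[-1]]['watcher'] if g1 else 'error'
--     w2 = data[g2[-1]]['watcher'] if g2 else 'error'
--     if w1 != 'error' and w2 != 'error':
--         for i in g1:
--             data[i]['watcher'] = w2
--         for i in g2:
--             data[i]['watcher'] = w1
--     return data
-- ===== Notes on version B (the rewrite author's own statement) =====
-- stated objective: alternative
-- what changed: B replaces A's two whole-list scans-with-branches by a date->positions index built once with enumerate/setdefault: the last watchers are read through the index (group[-1]) and the write loops touch only the indexed positions instead of re-scanning and re-testing every day.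
import Mathlib
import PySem

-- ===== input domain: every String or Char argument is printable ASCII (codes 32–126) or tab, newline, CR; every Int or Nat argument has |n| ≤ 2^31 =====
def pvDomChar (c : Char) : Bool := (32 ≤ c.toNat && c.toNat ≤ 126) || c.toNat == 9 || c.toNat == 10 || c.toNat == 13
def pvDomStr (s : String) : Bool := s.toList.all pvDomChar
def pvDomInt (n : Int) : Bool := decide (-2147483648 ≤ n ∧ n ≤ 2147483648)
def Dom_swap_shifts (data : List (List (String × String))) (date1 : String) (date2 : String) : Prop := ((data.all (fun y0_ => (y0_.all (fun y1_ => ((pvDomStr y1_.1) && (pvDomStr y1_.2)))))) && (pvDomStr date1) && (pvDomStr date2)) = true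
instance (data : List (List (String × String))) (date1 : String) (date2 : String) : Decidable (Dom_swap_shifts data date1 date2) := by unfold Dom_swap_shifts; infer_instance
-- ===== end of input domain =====

-- B replaces A's two whole-list scans-with-branches by a date -> positions index built once;
-- last watchers are read through the index and the writes touch only the indexed positions
-- (objective: alternative). Both A and B mutate the day dicts in place in Python; the
-- equivalence proved is about the return value.


-- ===== PORT A =====
-- first loop: watcher1/watcher2 accumulate the watcher of the last day matching date1/date2
def swap_shifts (data : List (List (String × String))) (date1 : String) (date2 : String) : List (List (String × String)) :=
  let w : String × String := data.foldl (fun (w : String × String) day =>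
    let w1 := if (PySem.Dict.mk day).getD "date" "" = date1 then (PySem.Dict.mk day).getD "watcher" "" else w.1
    let w2 := if (PySem.Dict.mk day).getD "date" "" = date2 then (PySem.Dict.mk day).getD "watcher" "" else w.2
    (w1, w2)) ("error", "error")
  if w.1 ≠ "error" ∧ w.2 ≠ "error" then
    -- second loop: both ifs run in sequence on the (possibly already updated) day
    data.map (fun day =>
      let day := if (PySem.Dict.mk day).getD "date" "" = date1 then ((PySem.Dict.mk day).insert "watcher" w.2).items else day
      let day := if (PySem.Dict.mk day).getD "date" "" = date2 then ((PySem.Dict.mk day).insert "watcher" w.1).items else day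
      day)
  else data

-- ===== PORT B =====
-- index = {}; for i, day in enumerate(data): index.setdefault(day['date'], []).append(i)
-- (setdefault(k, []).append(i) sets index[k] to index.get(k, []) + [i], key position unchanged = Dict.modify)
-- the indices produced by enumerate are ≥ 0, so '.toNat' in the write loops is exact
def swap_shifts_alt (data : List (List (String × String))) (date1 : String) (date2 : String) : List (List (String × String)) :=
  let idx : PySem.Dict String (List Int) :=
    (PySem.List.enumerate data 0).foldl
      (fun d p => d.modify ((PySem.Dict.mk p.2).getD "date" "") [] (fun l => l ++ [p.1]))
      PySem.Dict.empty
  let g1 := idx.getD date1 []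
  let g2 := idx.getD date2 []
  let w1 := if g1 ≠ [] then (PySem.Dict.mk (PySem.List.pyGetD data (PySem.List.pyGetD g1 (-1) 0) [])).getD "watcher" "" else "error"
  let w2 := if g2 ≠ [] then (PySem.Dict.mk (PySem.List.pyGetD data (PySem.List.pyGetD g2 (-1) 0) [])).getD "watcher" "" else "error"
  if w1 ≠ "error" ∧ w2 ≠ "error" then
    let d1 := g1.foldl (fun acc i => acc.set i.toNat (((PySem.Dict.mk (PySem.List.pyGetD acc i [])).insert "watcher" w2).items)) data
    g2.foldl (fun acc i => acc.set i.toNat (((PySem.Dict.mk (PySem.List.pyGetD acc i [])).insert "watcher" w1).items)) d1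
  else data

-- ===== PRECONDITION & SPEC =====
-- Pre_ excludes exactly the inputs where Python A raises KeyError: a day without a 'date' key,
-- or a day matching date1/date2 without a 'watcher' key.
def Pre_swap_shifts (data : List (List (String × String))) (date1 : String) (date2 : String) : Prop :=
  ∀ day ∈ data, (PySem.Dict.mk day).contains "date" = true ∧
    (((PySem.Dict.mk day).getD "date" "" = date1 ∨ (PySem.Dict.mk day).getD "date" "" = date2) →
      (PySem.Dict.mk day).contains "watcher" = true)
instance (data : List (List (String × String))) (date1 : String) (date2 : String) : Decidable (Pre_swap_shifts data date1 date2) := by unfold Pre_swap_shifts; infer_instance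

def pvWitness_swap_shifts : (List (List (String × String))) × String × String :=
  ([[("date", "d1"), ("watcher", "alice")], [("date", "d2"), ("watcher", "bob")]], "d1", "d2")

def Spec_swap_shifts (data : List (List (String × String))) (date1 : String) (date2 : String) (out : List (List (String × String))) : Prop := out = swap_shifts_alt data date1 date2
instance (data : List (List (String × String))) (date1 : String) (date2 : String) (out : List (List (String × String))) : Decidable (Spec_swap_shifts data date1 date2 out) := by unfold Spec_swap_shifts; infer_instance

-- ===== CLAIM (what is proved, stated in full; the proofs are below) =====
def Claim_equal_swap_shifts : Prop := ∀ (data : List (List (String × String))) (date1 : String) (date2 : String), Dom_swap_shifts data date1 date2 → Pre_swap_shifts data date1 date2 → Spec_swap_shifts data date1 date2 (swap_shifts data date1 date2)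

-- ===== LEMMAS AND PROOFS =====

-- A's first fold computes exactly the last matching day's watcher (as a reversed find).
theorem pass1_eq (data : List (List (String × String))) (date1 date2 : String) (a b : String) :
    data.foldl (fun (w : String × String) day =>
      let w1 := if (PySem.Dict.mk day).getD "date" "" = date1 then (PySem.Dict.mk day).getD "watcher" "" else w.1
      let w2 := if (PySem.Dict.mk day).getD "date" "" = date2 then (PySem.Dict.mk day).getD "watcher" "" else w.2
      (w1, w2)) (a, b)
    = ((match data.reverse.find? (fun day => (PySem.Dict.mk day).getD "date" "" == date1) with
        | some day => (PySem.Dict.mk day).getD "watcher" ""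
        | none => a),
       (match data.reverse.find? (fun day => (PySem.Dict.mk day).getD "date" "" == date2) with
        | some day => (PySem.Dict.mk day).getD "watcher" ""
        | none => b)) := by
  induction data generalizing a b with
  | nil => simp
  | cons day rest ih =>
    simp only [List.foldl_cons, List.reverse_cons, List.find?_append]
    rw [ih]
    refine Prod.ext ?_ ?_
    · cases h : rest.reverse.find? (fun day => (PySem.Dict.mk day).getD "date" "" == date1) with
      | some d => simp
      | none =>
        by_cases hd : (PySem.Dict.mk day).getD "date" "" = date1 <;> simp [hd]
    · cases h : rest.reverse.find? (fun day => (PySem.Dict.mk day).getD "date" "" == date2) with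
      | some d => simp
      | none =>
        by_cases hd : (PySem.Dict.mk day).getD "date" "" = date2 <;> simp [hd]

-- B's grouping fold, looked up at q, is the list of positions of the days whose date is q.
theorem idx_getD (data : List (List (String × String))) (q : String) :
    ((PySem.List.enumerate data 0).foldl
      (fun d p => d.modify ((PySem.Dict.mk p.2).getD "date" "") [] (fun l => l ++ [p.1]))
      PySem.Dict.empty).getD q []
    = ((PySem.List.enumerate data 0).filter
        (fun p => (PySem.Dict.mk p.2).getD "date" "" == q)).map (fun p => p.1) := by
  have h : ((PySem.List.enumerate data 0).foldl
      (fun d p => d.modify ((PySem.Dict.mk p.2).getD "date" "") [] (fun l => l ++ [p.1]))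
      PySem.Dict.empty)
      = (((PySem.List.enumerate data 0).map
          (fun p => ((PySem.Dict.mk p.2).getD "date" "", p.1))).foldl
        (fun d r => d.modify r.1 [] (fun l => l ++ [r.2])) PySem.Dict.empty) := by
    rw [List.foldl_map]
  rw [h, PySem.Dict.getD_foldl_modify_append, PySem.Dict.getD_empty, List.filter_map,
    List.map_map]
  simp [Function.comp_def]

-- the last pair of the filtered enumeration carries exactly the reversed find
theorem lastmatch (data : List (List (String × String))) (P : List (String × String) → Bool) :
    ∀ s : Int,
    (((PySem.List.enumerate data s).filter (fun p => P p.2)).getLast?).map (fun p => p.2)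
      = data.reverse.find? P := by
  induction data with
  | nil => intro s; simp [PySem.List.enumerate_nil]
  | cons day rest ih =>
    intro s
    simp only [PySem.List.enumerate_cons, List.reverse_cons, List.find?_append]
    by_cases hP : P day
    · rw [List.filter_cons_of_pos (by simpa using hP)]
      cases h : ((PySem.List.enumerate rest (s+1)).filter (fun p => P p.2)) with
      | nil =>
        have : rest.reverse.find? P = none := by rw [← ih (s+1), h]; rfl
        simp [this, hP]
      | cons y ys =>
        have h2 : ((s, day) :: y :: ys).getLast? = (y :: ys).getLast? := List.getLast?_cons_cons
        rw [h2, ← h, ih (s+1)]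
        cases hf : rest.reverse.find? P with
        | none => rw [← ih (s+1), h] at hf; simp at hf
        | some z => simp
    · rw [List.filter_cons_of_neg (by simpa using hP)]
      rw [ih (s+1)]
      cases hf : rest.reverse.find? P with
      | none => simp [hP]
      | some z => simp

-- xs[-1] is the last element
theorem pyGetD_neg_one {α : Type} (xs : List α) (d : α) :
    PySem.List.pyGetD xs (-1) d = xs.getLast?.getD d := by
  cases xs with
  | nil => simp [PySem.List.pyGetD, PySem.List.pyGet?, PySem.List.pyIdx?]
  | cons x t =>
    have h1 : PySem.List.pyGetD (x :: t) (-(1:Nat)) d = (x :: t)[(x :: t).length - 1] :=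
      PySem.List.pyGetD_neg_natCast _ 1 d (by omega) (by simp)
    simp only [Nat.cast_one] at h1
    rw [h1, List.getLast?_eq_getElem?, List.getElem?_eq_getElem (by simp)]
    simp

-- every pair of enumerate(data) indexes its own day
theorem enum_get (data : List (List (String × String))) (p : Int × List (String × String))
    (hp : p ∈ PySem.List.enumerate data 0) :
    PySem.List.pyGetD data p.1 [] = p.2 := by
  rw [PySem.List.mem_enumerate_iff] at hp
  obtain ⟨k, hk, rfl⟩ := hp
  simp only [zero_add]
  rw [PySem.List.pyGetD_natCast]
  simp [List.getD_eq_getElem?_getD, List.getElem?_eq_getElem hk]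

-- B's last-watcher read through the index equals A's reversed find
theorem read_eq (data : List (List (String × String))) (q : String) :
    (if (((PySem.List.enumerate data 0).filter
            (fun p => (PySem.Dict.mk p.2).getD "date" "" == q)).map (fun p => p.1)) ≠ [] then
        (PySem.Dict.mk (PySem.List.pyGetD data
          (PySem.List.pyGetD (((PySem.List.enumerate data 0).filter
            (fun p => (PySem.Dict.mk p.2).getD "date" "" == q)).map (fun p => p.1)) (-1) 0) [])).getD "watcher" ""
      else "error")
    = (match data.reverse.find? (fun day => (PySem.Dict.mk day).getD "date" "" == q) with
        | some day => (PySem.Dict.mk day).getD "watcher" ""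
        | none => "error") := by
  cases hm : ((PySem.List.enumerate data 0).filter
      (fun p => (PySem.Dict.mk p.2).getD "date" "" == q)) with
  | nil =>
    have hf : data.reverse.find? (fun day => (PySem.Dict.mk day).getD "date" "" == q) = none := by
      rw [← lastmatch data _ 0, hm]; rfl
    simp [hf]
  | cons y ys =>
    have hne : ((PySem.List.enumerate data 0).filter
        (fun p => (PySem.Dict.mk p.2).getD "date" "" == q)) ≠ [] := by
      rw [hm]; exact List.cons_ne_nil _ _
    obtain ⟨p, hp⟩ : ∃ p, ((PySem.List.enumerate data 0).filter
        (fun p => (PySem.Dict.mk p.2).getD "date" "" == q)).getLast? = some p := by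
      rw [hm]
      exact Option.isSome_iff_exists.mp (List.getLast?_isSome.mpr (List.cons_ne_nil _ _))
    have hf : data.reverse.find? (fun day => (PySem.Dict.mk day).getD "date" "" == q)
        = some p.2 := by
      rw [← lastmatch data _ 0, hp]; rfl
    have hidx : PySem.List.pyGetD (((PySem.List.enumerate data 0).filter
        (fun p => (PySem.Dict.mk p.2).getD "date" "" == q)).map (fun p => p.1)) (-1) 0 = p.1 := by
      rw [pyGetD_neg_one, List.getLast?_map, hp]; rfl
    have hmem : p ∈ PySem.List.enumerate data 0 :=
      List.mem_of_mem_filter (List.mem_of_getLast? hp)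
    rw [← hm] at *
    rw [if_pos (by simpa using hne), hidx, enum_get data p hmem, hf]

-- a write loop over the positions of the P-days rewrites exactly the P-days
theorem setmap (P : List (String × String) → Bool)
    (upd : List (String × String) → List (String × String)) :
    ∀ (data pre : List (List (String × String))),
    (((PySem.List.enumerate data (pre.length : Int)).filter (fun p => P p.2)).map (fun p => p.1)).foldl
      (fun acc i => acc.set i.toNat (upd (PySem.List.pyGetD acc i []))) (pre ++ data)
    = pre ++ data.map (fun day => if P day then upd day else day) := by
  intro data
  induction data with
  | nil => intro pre; simp [PySem.List.enumerate_nil]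
  | cons day rest ih =>
    intro pre
    simp only [PySem.List.enumerate_cons]
    by_cases hP : P day
    · rw [List.filter_cons_of_pos (by simpa using hP)]
      simp only [List.map_cons, List.foldl_cons]
      have hget : PySem.List.pyGetD (pre ++ day :: rest) (pre.length : Int) [] = day := by
        rw [PySem.List.pyGetD_natCast]
        simp [List.getD_eq_getElem?_getD]
      rw [hget]
      have hset : (pre ++ day :: rest).set ((pre.length : Int)).toNat (upd day)
          = (pre ++ [upd day]) ++ rest := by
        simp
      rw [hset]
      have hlen : ((pre.length : Int) + 1) = ((pre ++ [upd day]).length : Int) := by simp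
      rw [hlen, ih (pre ++ [upd day])]
      simp [hP]
    · rw [List.filter_cons_of_neg (by simpa using hP)]
      have hacc : pre ++ day :: rest = (pre ++ [day]) ++ rest := by simp
      have hlen : ((pre.length : Int) + 1) = ((pre ++ [day]).length : Int) := by simp
      rw [hacc, hlen, ih (pre ++ [day])]
      simp [hP]

theorem enumerate_map {α β : Type} (f : α → β) (data : List α) (s : Int) :
    PySem.List.enumerate (data.map f) s
      = (PySem.List.enumerate data s).map (fun p => (p.1, f p.2)) := by
  induction data generalizing s with
  | nil => simp [PySem.List.enumerate_nil]
  | cons x xs ih => simp [PySem.List.enumerate_cons, ih]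

-- inserting a watcher never changes the date
theorem date_insert (day : List (String × String)) (w : String) :
    (PySem.Dict.mk (((PySem.Dict.mk day).insert "watcher" w).items)).getD "date" ""
      = (PySem.Dict.mk day).getD "date" "" := by
  have h : PySem.Dict.mk (((PySem.Dict.mk day).insert "watcher" w).items)
      = (PySem.Dict.mk day).insert "watcher" w := PySem.Dict.ext_iff.mpr rfl
  rw [h, PySem.Dict.getD_insert_of_ne _ _ _ (by decide)]

-- B's two position-driven write loops equal A's single rewriting map
theorem writes_eq (data : List (List (String × String))) (date1 date2 w1v w2v : String) :
    ((((PySem.List.enumerate data 0).filter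
        (fun p => (PySem.Dict.mk p.2).getD "date" "" == date2)).map (fun p => p.1)).foldl
      (fun acc i => acc.set i.toNat (((PySem.Dict.mk (PySem.List.pyGetD acc i [])).insert "watcher" w1v).items))
      ((((PySem.List.enumerate data 0).filter
          (fun p => (PySem.Dict.mk p.2).getD "date" "" == date1)).map (fun p => p.1)).foldl
        (fun acc i => acc.set i.toNat (((PySem.Dict.mk (PySem.List.pyGetD acc i [])).insert "watcher" w2v).items))
        data))
    = data.map (fun day =>
        let day := if (PySem.Dict.mk day).getD "date" "" = date1 then ((PySem.Dict.mk day).insert "watcher" w2v).items else day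
        let day := if (PySem.Dict.mk day).getD "date" "" = date2 then ((PySem.Dict.mk day).insert "watcher" w1v).items else day
        day) := by
  have h1 := setmap (fun day => (PySem.Dict.mk day).getD "date" "" == date1)
    (fun day => ((PySem.Dict.mk day).insert "watcher" w2v).items) data []
  simp only [List.nil_append, List.length_nil, Nat.cast_zero] at h1
  rw [h1]
  -- the second loop's positions, computed on the original list, are the date2 positions of the updated list
  have hidx2 : (((PySem.List.enumerate data 0).filter
      (fun p => (PySem.Dict.mk p.2).getD "date" "" == date2)).map (fun p => p.1))
      = (((PySem.List.enumerate (data.map (fun day =>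
            if (PySem.Dict.mk day).getD "date" "" == date1
            then ((PySem.Dict.mk day).insert "watcher" w2v).items else day)) 0).filter
          (fun p => (PySem.Dict.mk p.2).getD "date" "" == date2)).map (fun p => p.1)) := by
    rw [enumerate_map, List.filter_map, List.map_map]
    refine (congrArg _ (List.filter_congr ?_)).trans rfl
    intro p _
    by_cases h : (PySem.Dict.mk p.2).getD "date" "" = date1 <;>
      simp [h, date_insert]
  rw [hidx2]
  have h2 := setmap (fun day => (PySem.Dict.mk day).getD "date" "" == date2)
    (fun day => ((PySem.Dict.mk day).insert "watcher" w1v).items)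
    (data.map (fun day =>
      if (PySem.Dict.mk day).getD "date" "" == date1
      then ((PySem.Dict.mk day).insert "watcher" w2v).items else day)) []
  simp only [List.nil_append, List.length_nil, Nat.cast_zero] at h2
  rw [h2, List.map_map]
  refine List.map_congr_left fun day _ => ?_
  simp only [Function.comp_def]
  by_cases h1d : (PySem.Dict.mk day).getD "date" "" = date1 <;>
    by_cases h2d : (PySem.Dict.mk day).getD "date" "" = date2 <;>
      simp [h1d, h2d, date_insert]

-- ===== VERDICT (by name: the statement is the Claim_ definition above) =====
theorem swap_shifts_spec : Claim_equal_swap_shifts := by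
  intro data date1 date2 _ _
  unfold Spec_swap_shifts swap_shifts swap_shifts_alt
  rw [pass1_eq]
  simp only [idx_getD]
  rw [read_eq data date1, read_eq data date2]
  split_ifs with h
  · exact (writes_eq data date1 date2 _ _).symm
  · rfl
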